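-- pv_equiv track=rewrite | github.com/MelanyAvila/Ejercicios-clase-8 | funciones/punto_1.py | recorrer_lista_ambos_lados
-- ===== SOURCE A (Python) =====
-- def recorrer_lista_ambos_lados(ingresos: list):
--     recorrido_adelante = []
--     recorrido_atras = []
--
--     # adelante
--     for item in ingresos:
--         recorrido_adelante = recorrido_adelante + [item]
--
--     # atras
--     for i in range(len(ingresos) - 1, -1, -1):
--         recorrido_atras = recorrido_atras + [ingresos[i]]
--     return recorrido_adelante, recorrido_atras
-- ===== SOURCE B (Python) =====
-- def recorrer_lista_ambos_lados(ingresos: list):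
--     recorrido_adelante = []
--     recorrido_atras = []
--     for item in ingresos:
--         recorrido_adelante.append(item)
--         recorrido_atras.insert(0, item)
--     return recorrido_adelante, recorrido_atras
-- ===== Notes on version B (the rewrite author's own statement) =====
-- stated objective: faster
-- what changed: One forward pass builds both lists (append to the forward list, prepend to the backward one via insert(0, item)), replacing A's two loops whose 'acc = acc + [item]' rebuilds the whole accumulator each iteration and whose second loop reads by reverse index.
import Mathlib
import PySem

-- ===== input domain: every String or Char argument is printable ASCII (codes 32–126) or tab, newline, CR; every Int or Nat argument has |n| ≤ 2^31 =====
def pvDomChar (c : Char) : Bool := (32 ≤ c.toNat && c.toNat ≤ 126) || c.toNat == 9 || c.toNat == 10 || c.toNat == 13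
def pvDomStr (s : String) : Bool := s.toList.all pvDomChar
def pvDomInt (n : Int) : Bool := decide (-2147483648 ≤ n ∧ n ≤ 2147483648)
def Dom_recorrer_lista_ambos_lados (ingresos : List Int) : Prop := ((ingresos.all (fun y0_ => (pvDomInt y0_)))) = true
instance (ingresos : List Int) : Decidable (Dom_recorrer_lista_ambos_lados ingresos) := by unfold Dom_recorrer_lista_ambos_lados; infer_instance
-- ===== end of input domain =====

-- B builds both lists in one forward pass (append forward, prepend backward); no mutation of the input in either version.

-- ===== PORT A =====
def recorrer_lista_ambos_lados (ingresos : List Int) : List Int × List Int :=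
  -- adelante: for item in ingresos: recorrido_adelante = recorrido_adelante + [item]
  let recorrido_adelante := ingresos.foldl (fun acc item => acc ++ [item]) []
  -- atras: for i in range(len(ingresos) - 1, -1, -1): recorrido_atras = recorrido_atras + [ingresos[i]]
  let recorrido_atras :=
    (PySem.List.pyRange ((ingresos.length : Int) - 1) (-1) (-1)).foldl
      (fun acc i => acc ++ [PySem.List.pyGetD ingresos i 0]) []
  (recorrido_adelante, recorrido_atras)

-- ===== PORT B =====
def recorrer_lista_ambos_lados_alt (ingresos : List Int) : List Int × List Int :=
  -- single pass: append item to the forward list, cons item onto the backward list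
  ingresos.foldl (fun p item => (p.1 ++ [item], item :: p.2)) ([], [])

-- ===== PRECONDITION & SPEC =====
def Spec_recorrer_lista_ambos_lados (ingresos : List Int) (out : List Int × List Int) : Prop := out = recorrer_lista_ambos_lados_alt ingresos
instance (ingresos : List Int) (out : List Int × List Int) : Decidable (Spec_recorrer_lista_ambos_lados ingresos out) := by unfold Spec_recorrer_lista_ambos_lados; infer_instance

-- ===== CLAIM (what is proved, stated in full; the proofs are below) =====
def Claim_equal_recorrer_lista_ambos_lados : Prop := ∀ (ingresos : List Int), Dom_recorrer_lista_ambos_lados ingresos → Spec_recorrer_lista_ambos_lados ingresos (recorrer_lista_ambos_lados ingresos)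

-- ===== LEMMAS AND PROOFS =====

-- A's forward loop appends each element: the result is init ++ l.
theorem foldl_append_singleton (l : List Int) (init : List Int) :
    l.foldl (fun acc item => acc ++ [item]) init = init ++ l := by
  induction l generalizing init with
  | nil => simp
  | cons x xs ih => simp [List.foldl, ih]

-- An append-of-image fold is init ++ map.
theorem foldl_append_map (g : Int → Int) (l : List Int) (init : List Int) :
    l.foldl (fun acc i => acc ++ [g i]) init = init ++ l.map g := by
  induction l generalizing init with
  | nil => simp
  | cons x xs ih => simp [List.foldl, ih]

-- B's single pass produces (init₁ ++ l, l.reverse ++ init₂).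
theorem foldl_both (l : List Int) (f b : List Int) :
    l.foldl (fun p item => (p.1 ++ [item], item :: p.2)) (f, b)
      = (f ++ l, l.reverse ++ b) := by
  induction l generalizing f b with
  | nil => simp
  | cons x xs ih => simp [List.foldl, ih]

-- A's backward loop yields the reverse of the list.
theorem a_backward (ingresos : List Int) :
    (PySem.List.pyRange ((ingresos.length : Int) - 1) (-1) (-1)).foldl
      (fun acc i => acc ++ [PySem.List.pyGetD ingresos i 0]) [] = ingresos.reverse := by
  have hr : PySem.List.pyRange ((ingresos.length : Int) - 1) (-1) (-1)
      = (PySem.List.pyRange 0 (ingresos.length : Int) 1).reverse := by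
    rw [PySem.List.pyRange_neg_one_eq_reverse]; norm_num
  rw [hr, foldl_append_map, List.nil_append, List.map_reverse, PySem.List.map_pyGetD_pyRange_zero']

-- ===== VERDICT (by name: the statement is the Claim_ definition above) =====
theorem recorrer_lista_ambos_lados_spec : Claim_equal_recorrer_lista_ambos_lados := by
  intro ingresos _
  unfold Spec_recorrer_lista_ambos_lados recorrer_lista_ambos_lados recorrer_lista_ambos_lados_alt
  rw [foldl_both, foldl_append_singleton, a_backward]
  simp
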